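-- pv_equiv track=rewrite | github.com/cejiofor/poker_term_project | handEval.py | quadsTripsPairs
-- ===== SOURCE A (Python) =====
-- def quadsTripsPairs(faces):
--     #Returns the number of Four of a Kinds, Three of a Kinds and Pairs
--     #in a given  hand in the form of a list
--     numberPairs = 0
--     numberTrips = 0
--     numberQuads = 0
--     alreadyCounted = []
--     for face in range(len(faces)):
--         if faces[face] not in alreadyCounted:
--             count = faces.count(faces[face])
--             if count == 4:
--                 numberQuads += 1
--             elif count == 3:
--                 numberTrips += 1
--             elif count == 2:
--                 numberPairs += 1
--             alreadyCounted += [faces[face]]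
--     return [numberQuads, numberTrips, numberPairs]
-- ===== SOURCE B (Python) =====
-- def quadsTripsPairs(faces):
--     # One-pass frequency table instead of repeated faces.count scans.
--     counts = {}
--     for f in faces:
--         counts[f] = counts.get(f, 0) + 1
--     numberQuads = 0
--     numberTrips = 0
--     numberPairs = 0
--     for c in counts.values():
--         if c == 4:
--             numberQuads += 1
--         elif c == 3:
--             numberTrips += 1
--         elif c == 2:
--             numberPairs += 1
--     return [numberQuads, numberTrips, numberPairs]
-- ===== Notes on version B (the rewrite author's own statement) =====
-- stated objective: faster
-- what changed: Replaces the per-face membership list and repeated faces.count scans with a frequency dictionary built in one pass, then classifies each distinct face's count in a second linear pass.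
import Mathlib
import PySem

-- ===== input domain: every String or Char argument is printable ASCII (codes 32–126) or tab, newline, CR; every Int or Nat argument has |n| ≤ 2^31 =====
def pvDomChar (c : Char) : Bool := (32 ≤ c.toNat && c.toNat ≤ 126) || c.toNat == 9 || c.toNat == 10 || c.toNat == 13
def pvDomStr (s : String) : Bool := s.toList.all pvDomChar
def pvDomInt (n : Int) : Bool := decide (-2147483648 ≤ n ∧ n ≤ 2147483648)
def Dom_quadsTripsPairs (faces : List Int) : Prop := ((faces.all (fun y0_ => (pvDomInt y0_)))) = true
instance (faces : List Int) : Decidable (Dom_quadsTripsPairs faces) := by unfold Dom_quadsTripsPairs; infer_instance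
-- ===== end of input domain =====

-- B replaces A's repeated faces.count scans over an "already counted" list with a frequency
-- dictionary built in one pass (faster: O(n^2) -> O(n)).


-- ===== PORT A =====
-- state: ((numberQuads, numberTrips, numberPairs), alreadyCounted)
def quadsTripsPairs (faces : List Int) : List Int :=
  let r := (PySem.List.pyRange 0 (PySem.List.len faces) 1).foldl
    (fun (st : (Int × Int × Int) × List Int) face =>
      let x := PySem.List.pyGetD faces face 0
      if x ∈ st.2 then st
      else
        let c : Int := (PySem.List.count faces x : Int)
        ((if c = 4 then (st.1.1 + 1, st.1.2.1, st.1.2.2)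
          else if c = 3 then (st.1.1, st.1.2.1 + 1, st.1.2.2)
          else if c = 2 then (st.1.1, st.1.2.1, st.1.2.2 + 1)
          else st.1), st.2 ++ [x]))
    ((0, 0, 0), [])
  [r.1.1, r.1.2.1, r.1.2.2]

-- ===== PORT B =====
def quadsTripsPairs_alt (faces : List Int) : List Int :=
  let counts := faces.foldl (fun d x => d.insert x (d.getD x 0 + 1)) PySem.Dict.empty
  let r := counts.values.foldl
    (fun (st : Int × Int × Int) (c : Int) =>
      if c = 4 then (st.1 + 1, st.2.1, st.2.2)
      else if c = 3 then (st.1, st.2.1 + 1, st.2.2)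
      else if c = 2 then (st.1, st.2.1, st.2.2 + 1)
      else st)
    (0, 0, 0)
  [r.1, r.2.1, r.2.2]

-- ===== PRECONDITION & SPEC =====
def Spec_quadsTripsPairs (faces : List Int) (out : List Int) : Prop := out = quadsTripsPairs_alt faces
instance (faces : List Int) (out : List Int) : Decidable (Spec_quadsTripsPairs faces out) := by unfold Spec_quadsTripsPairs; infer_instance

-- ===== CLAIM (what is proved, stated in full; the proofs are below) =====
def Claim_equal_quadsTripsPairs : Prop := ∀ (faces : List Int), Dom_quadsTripsPairs faces → Spec_quadsTripsPairs faces (quadsTripsPairs faces)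

-- ===== LEMMAS AND PROOFS =====

-- the classification step shared (after rewriting) by both loops
def pvStep (st : Int × Int × Int) (c : Int) : Int × Int × Int :=
  if c = 4 then (st.1 + 1, st.2.1, st.2.2)
  else if c = 3 then (st.1, st.2.1 + 1, st.2.2)
  else if c = 2 then (st.1, st.2.1, st.2.2 + 1)
  else st

-- the distinct elements of ys not already in ac, in first-occurrence order (A's processing order)
def pvNew (ac : List Int) : List Int → List Int
  | [] => []
  | x :: ys => if x ∈ ac then pvNew ac ys else x :: pvNew (ac ++ [x]) ys

-- A's loop body (after the index loop is turned into a fold over faces)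
def pvStepA (faces : List Int) (st : (Int × Int × Int) × List Int) (x : Int) :
    (Int × Int × Int) × List Int :=
  if x ∈ st.2 then st
  else (pvStep st.1 ((PySem.List.count faces x : Int)), st.2 ++ [x])

lemma pvLoopA (faces : List Int) :
    ∀ (ys : List Int) (st : Int × Int × Int) (ac : List Int),
      (ys.foldl (pvStepA faces) (st, ac)).1
        = (pvNew ac ys).foldl (fun s x => pvStep s ((PySem.List.count faces x : Int))) st := by
  intro ys
  induction ys with
  | nil => intro st ac; simp [pvNew]
  | cons x ys ih =>
    intro st ac
    by_cases hx : x ∈ ac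
    · simp [pvNew, pvStepA, hx, ih]
    · simp [pvNew, pvStepA, hx, ih]

lemma pvOfList_newOnes :
    ∀ (ys ac : List Int), ys.foldl PySem.Set.add ac = ac ++ pvNew ac ys := by
  intro ys
  induction ys with
  | nil => intro ac; simp [pvNew]
  | cons x ys ih =>
    intro ac
    by_cases hx : x ∈ ac
    · simp [pvNew, hx, PySem.Set.add, ih]
    · simp [pvNew, hx, PySem.Set.add, ih]

lemma pvSetOfList_eq (xs : List Int) : PySem.Set.ofList xs = pvNew [] xs := by
  have h := pvOfList_newOnes xs []
  simpa [PySem.Set.ofList] using h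

-- ===== VERDICT (by name: the statement is the Claim_ definition above) =====
theorem quadsTripsPairs_spec : Claim_equal_quadsTripsPairs := by
  intro faces _
  show quadsTripsPairs faces = quadsTripsPairs_alt faces
  have hA : quadsTripsPairs faces =
      (fun r : (Int × Int × Int) × List Int => [r.1.1, r.1.2.1, r.1.2.2])
        (List.foldl (fun acc j => pvStepA faces acc (PySem.List.pyGetD faces j 0)) ((0,0,0), [])
          (PySem.List.pyRange 0 (faces.length : Int) 1)) := rfl
  have hB : quadsTripsPairs_alt faces =
      (fun r : Int × Int × Int => [r.1, r.2.1, r.2.2])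
        (List.foldl
          (fun (st : Int × Int × Int) (c : Int) =>
            if c = 4 then (st.1 + 1, st.2.1, st.2.2)
            else if c = 3 then (st.1, st.2.1 + 1, st.2.2)
            else if c = 2 then (st.1, st.2.1, st.2.2 + 1)
            else st)
          (0, 0, 0)
          (List.foldl (fun d x => d.insert x (d.getD x 0 + 1)) PySem.Dict.empty faces).values) := rfl
  rw [hA, hB, PySem.List.foldl_pyRange_zero_pyGetD' faces 0 (pvStepA faces) ((0,0,0), [])]
  simp only [PySem.Dict.foldl_insert_getD_add_one_eq_counter]
  have hval : (PySem.Dict.counter faces).values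
      = (PySem.Set.ofList faces).map (fun k => ((PySem.List.count faces k : Int))) := by
    show ((PySem.Dict.counter faces).items).map (·.2) = _
    rw [PySem.Dict.items_counter]
    simp [PySem.List.count]
  rw [hval, List.foldl_map]
  simp only [pvSetOfList_eq, pvLoopA]
  rfl
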